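-- pv_equiv track=rewrite | github.com/neoCheck/advent_of_code | 2024/07/day_07_2.py | get_combinations_2
-- ===== SOURCE A (Python) =====
-- def to_custom_base_012(nb: int) -> str:
--     if nb == 0:
--         return "0"
--
--     digits = []
--     base = 3
--     while nb > 0:
--         digits.append(str(nb % base))
--         nb //= base
--
--     return "".join(reversed(digits))
--
-- def get_combinations_2(max_combination_len: int) -> dict[int, list[str]]:
--     comb_2 = {
--         power: [
--             to_custom_base_012(n).zfill(power).replace("0", "+").replace("1", "*").replace("2", "|")
--             for n in range(3**power)
--         ]
--         for power in range(1, max_combination_len + 1)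
--     }
--
--     # Remove all combinations that do not have "|"
--     return {k: [s for s in v if "|" in s] for k, v in comb_2.items()}
-- ===== SOURCE B (Python) =====
-- def get_combinations_2(max_combination_len: int) -> dict[int, list[str]]:
--     # Grow the operator strings incrementally: the strings of length p are the
--     # strings of length p-1, each extended by '+', '*', '|' (last position varies
--     # fastest), which is exactly base-3 counting order with 0->'+', 1->'*', 2->'|'.
--     combos = [""]
--     result = {}
--     for power in range(1, max_combination_len + 1):
--         combos = [s + op for s in combos for op in "+*|"]
--         result[power] = [s for s in combos if "|" in s]
--     return result
-- ===== Notes on version B (the rewrite author's own statement) =====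
-- stated objective: alternative
-- what changed: B drops to_custom_base_012 and the per-number base-3 conversion + zfill + three str.replace passes, instead growing the operator strings of each length incrementally by appending '+', '*', '|' to the previous length's strings (same base-3 counting order).
import Mathlib
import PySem

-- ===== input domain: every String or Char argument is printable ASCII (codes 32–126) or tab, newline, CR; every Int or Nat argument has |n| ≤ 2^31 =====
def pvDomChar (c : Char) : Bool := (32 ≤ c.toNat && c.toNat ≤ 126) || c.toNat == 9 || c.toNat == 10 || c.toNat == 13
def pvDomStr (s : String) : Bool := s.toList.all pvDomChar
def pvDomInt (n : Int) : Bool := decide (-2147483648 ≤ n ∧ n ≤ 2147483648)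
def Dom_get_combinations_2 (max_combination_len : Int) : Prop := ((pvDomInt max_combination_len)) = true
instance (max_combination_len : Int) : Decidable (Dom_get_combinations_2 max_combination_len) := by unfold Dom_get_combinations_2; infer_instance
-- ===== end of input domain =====

-- B grows the operator strings of each length from those of the previous length instead of
-- converting every number to base 3 and running zfill + three str.replace passes; same values
-- and order, with one concatenation per produced string instead of several passes over it.

-- ===== PORT A =====
-- the 'while nb > 0' loop of to_custom_base_012 (digit strings accumulated LSB-first)
def tcbLoop (nb : Int) (digits : List String) : List String :=
  if 0 < nb then
    tcbLoop (PySem.Int.floordiv nb 3) (digits ++ [PySem.Int.toStr (PySem.Int.mod nb 3)])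
  else digits
termination_by nb.toNat
decreasing_by
  rw [PySem.Int.floordiv_eq_ediv_of_pos (by norm_num)]
  omega

def to_custom_base_012 (nb : Int) : String :=
  if nb = 0 then "0"
  else PySem.Str.join "" (tcbLoop nb []).reverse

def get_combinations_2 (max_combination_len : Int) : List (Int × List String) :=
  -- dict comprehension: the keys (powers) are distinct, so the assoc list is exact;
  -- 3**power: power ≥ 1 inside this range, so the exponent is exactly power.toNat
  let comb_2 : List (Int × List String) :=
    (PySem.List.pyRange 1 (max_combination_len + 1) 1).map (fun power =>
      (power, (PySem.List.pyRange 0 ((3 : Int) ^ power.toNat) 1).map (fun n =>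
        PySem.Str.replace (PySem.Str.replace (PySem.Str.replace
          (PySem.Str.zfill (to_custom_base_012 n) power) "0" "+") "1" "*") "2" "|")))
  comb_2.map (fun kv => (kv.1, kv.2.filter (fun s => PySem.Str.isIn "|" s)))

-- ===== PORT B =====
-- one iteration of B's loop body; 'result[power] = …' appends because each key is fresh
-- (the powers strictly increase), and 's + op' is String.ofList (s.toList ++ [op]) (exact,
-- avoiding Lean's kernel-opaque String.append)
def bStep (st : List String × List (Int × List String)) (power : Int) :
    List String × List (Int × List String) :=
  let combos := st.1.flatMap (fun s =>
    (String.toList "+*|").map (fun op => String.ofList (s.toList ++ [op])))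
  (combos, st.2 ++ [(power, combos.filter (fun s => PySem.Str.isIn "|" s))])

def get_combinations_2_alt (max_combination_len : Int) : List (Int × List String) :=
  ((PySem.List.pyRange 1 (max_combination_len + 1) 1).foldl bStep ([""], [])).2

-- ===== PRECONDITION & SPEC =====
def Spec_get_combinations_2 (max_combination_len : Int) (out : List (Int × List String)) : Prop := out = get_combinations_2_alt max_combination_len
instance (max_combination_len : Int) (out : List (Int × List String)) : Decidable (Spec_get_combinations_2 max_combination_len out) := by unfold Spec_get_combinations_2; infer_instance

-- ===== CLAIM (what is proved, stated in full; the proofs are below) =====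
def Claim_equal_get_combinations_2 : Prop := ∀ (max_combination_len : Int), Dom_get_combinations_2 max_combination_len → Spec_get_combinations_2 max_combination_len (get_combinations_2 max_combination_len)

-- ===== LEMMAS AND PROOFS =====

-- base-3 digit characters '0','1','2' and their operator images '+','*','|'
def dChar (r : Nat) : Char := if r = 0 then '0' else if r = 1 then '1' else '2'
def opChar3 (r : Nat) : Char := if r = 0 then '+' else if r = 1 then '*' else '|'

-- base-3 digits of n, most significant first (empty for 0)
def digPos : Nat → List Char
  | 0 => []
  | n + 1 => digPos ((n + 1) / 3) ++ [dChar ((n + 1) % 3)]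
decreasing_by omega

-- the p low base-3 digits of n as '0'/'1'/'2' chars, most significant first
def scanon : Nat → Nat → List Char
  | 0, _ => []
  | p + 1, n => scanon p (n / 3) ++ [dChar (n % 3)]

-- the p low base-3 digits of n as '+'/'*'/'|' chars, most significant first
def mcanon : Nat → Nat → List Char
  | 0, _ => []
  | p + 1, n => mcanon p (n / 3) ++ [opChar3 (n % 3)]

-- the canonical list of operator strings of length p, in base-3 counting order
def Cp (p : Nat) : List String := (List.range (3 ^ p)).map (fun n => String.ofList (mcanon p n))

-- B's comprehension as a function
def stepF (cs : List String) : List String :=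
  cs.flatMap (fun s => (String.toList "+*|").map (fun op => String.ofList (s.toList ++ [op])))

-- the digit strings accumulated by A's while loop, LSB first
def digLSBs : Nat → List String
  | 0 => []
  | n + 1 => String.ofList [dChar ((n + 1) % 3)] :: digLSBs ((n + 1) / 3)
decreasing_by omega

lemma toStr_dchar (r : Nat) (h : r < 3) : PySem.Int.toStr ((r : Nat) : Int) = String.ofList [dChar r] := by
  interval_cases r <;> decide

lemma tcb_eq (n : Nat) : ∀ ds, tcbLoop (n : Int) ds = ds ++ digLSBs n := by
  induction n using Nat.strong_induction_on with
  | _ n ih =>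
    intro ds
    match n with
    | 0 => rw [tcbLoop]; simp [digLSBs]
    | m + 1 =>
      rw [tcbLoop]
      simp only [show (0:Int) < ((m+1 : Nat) : Int) from by omega, dif_pos]
      have h3 : PySem.Int.floordiv ((m+1 : Nat) : Int) 3 = (((m+1)/3 : Nat) : Int) := by
        exact_mod_cast PySem.Int.floordiv_natCast (m+1) 3
      have h4 : PySem.Int.mod ((m+1 : Nat) : Int) 3 = (((m+1) % 3 : Nat) : Int) := by
        exact_mod_cast PySem.Int.mod_natCast (m+1) 3
      rw [h3, h4, ih ((m+1)/3) (by omega), toStr_dchar _ (by omega)]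
      simp [digLSBs]

lemma digLSBs_reverse (n : Nat) : (digLSBs n).reverse = (digPos n).map (fun c => String.ofList [c]) := by
  induction n using Nat.strong_induction_on with
  | _ n ih =>
    match n with
    | 0 => simp [digLSBs, digPos]
    | m + 1 => rw [digLSBs, digPos]; simp [ih ((m+1)/3) (by omega)]

lemma toList_to_custom (n : Nat) :
    (to_custom_base_012 (n : Int)).toList = if n = 0 then ['0'] else digPos n := by
  match n with
  | 0 => decide
  | m + 1 =>
    rw [to_custom_base_012, if_neg (by omega)]
    rw [tcb_eq (m+1) [], List.nil_append, digLSBs_reverse,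
      PySem.Str.toList_join]
    simp only [List.map_map]
    have : (String.toList ∘ fun c => String.ofList [c]) = fun c => [c] := by
      funext c; simp
    rw [this, if_neg (by omega)]
    have := PySem.Chars.join_nil_singletons (digPos (m+1))
    simpa using this


lemma digPos_chars (n : Nat) : ∀ c ∈ digPos n, c = '0' ∨ c = '1' ∨ c = '2' := by
  induction n using Nat.strong_induction_on with
  | _ n ih =>
    match n with
    | 0 => simp [digPos]
    | m + 1 =>
      rw [digPos]
      intro c hc
      rcases List.mem_append.1 hc with h | h
      · exact ih ((m+1)/3) (by omega) c h
      · simp at h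
        subst h
        unfold dChar
        split_ifs <;> simp

lemma digPos_len_le (p : Nat) : ∀ n, n < 3 ^ p → (digPos n).length ≤ p := by
  induction p with
  | zero =>
    intro n hn
    have : n = 0 := by simpa using hn
    simp [this, digPos]
  | succ p ih =>
    intro n hn
    match n with
    | 0 => simp [digPos]
    | m + 1 =>
      rw [digPos]
      have hd : (m + 1) / 3 < 3 ^ p := by
        rw [Nat.div_lt_iff_lt_mul (by norm_num)]
        calc m + 1 < 3 ^ (p + 1) := hn
        _ = 3 ^ p * 3 := by ring
      have := ih _ hd
      simp [this]

lemma zfill_digits (c : Char) (rest : List Char) (p : Nat)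
    (h0 : c ≠ '+') (h1 : c ≠ '-') (hlen : (c :: rest).length ≤ p) :
    PySem.Chars.zfill (c :: rest) (p : Int)
      = List.replicate (p - (c :: rest).length) '0' ++ (c :: rest) := by
  rw [PySem.Chars.zfill]
  by_cases hle : (p : Int) ≤ ((c :: rest).length : Int)
  · have hp : p = (c :: rest).length := by
      have : p ≤ (c :: rest).length := by exact_mod_cast hle
      omega
    rw [if_pos (by exact_mod_cast hle)]
    simp [hp]
  · rw [if_neg hle]
    simp [h0, h1]

lemma scanon_eq (p : Nat) : ∀ n, n < 3 ^ p →
    scanon p n = List.replicate (p - (digPos n).length) '0' ++ digPos n := by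
  induction p with
  | zero =>
    intro n hn
    have : n = 0 := by simpa using hn
    simp [this, scanon, digPos]
  | succ p ih =>
    intro n hn
    have hd : n / 3 < 3 ^ p := by
      rw [Nat.div_lt_iff_lt_mul (by norm_num)]
      calc n < 3 ^ (p + 1) := hn
      _ = 3 ^ p * 3 := by ring
    rw [scanon, ih _ hd]
    match n with
    | 0 =>
      simp [digPos, dChar]
      rw [← List.replicate_succ' ]
    | m + 1 =>
      conv_rhs => rw [digPos]
      have hlen := digPos_len_le p _ hd
      rw [List.length_append]
      simp only [List.length_singleton]
      have : p + 1 - ((digPos ((m+1)/3)).length + 1) = p - (digPos ((m+1)/3)).length := by omega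
      rw [this, List.append_assoc]

lemma replace_single_go (o n : Char) : ∀ (l acc : List Char),
    PySem.Chars.replace.go [o] [n] l.length l acc
      = acc.reverse ++ l.map (fun c => if c = o then n else c) := by
  intro l
  induction l with
  | nil => intro acc; simp [PySem.Chars.replace.go]
  | cons c t ih =>
    intro acc
    show PySem.Chars.replace.go [o] [n] (t.length + 1) (c :: t) acc = _
    rw [PySem.Chars.replace.go]
    by_cases hc : c = o
    · simp [hc, List.isPrefixOf, ih]
    · simp [List.isPrefixOf, (by simpa [eq_comm] using hc : ¬ o = c), hc, ih]
lemma replace_single (o n : Char) (cs : List Char) :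
    PySem.Chars.replace cs [o] [n] = cs.map (fun c => if c = o then n else c) := by
  simp [PySem.Chars.replace, replace_single_go]

lemma zfill_custom (p n : Nat) (hp : 1 ≤ p) (h : n < 3 ^ p) :
    PySem.Chars.zfill ((to_custom_base_012 (n : Int)).toList) (p : Int) = scanon p n := by
  rw [toList_to_custom, scanon_eq p n h]
  match n with
  | 0 =>
    rw [if_pos rfl]
    rw [zfill_digits '0' [] p (by decide) (by decide) (by simpa using hp)]
    simp [digPos]
    have : p = (p - 1) + 1 := by omega
    rw [this, List.replicate_succ']
    simp
  | m + 1 =>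
    rw [if_neg (by omega)]
    have hne : digPos (m + 1) ≠ [] := by rw [digPos]; simp
    obtain ⟨c, rest, hcr⟩ := List.exists_cons_of_ne_nil hne
    have hc : c = '0' ∨ c = '1' ∨ c = '2' := by
      apply digPos_chars (m+1)
      rw [hcr]; simp
    rw [hcr]
    rw [zfill_digits c rest p (by rcases hc with h|h|h <;> simp [h]) (by rcases hc with h|h|h <;> simp [h])
      (by rw [← hcr]; exact digPos_len_le p _ h)]

lemma replace3_scanon (p : Nat) : ∀ n,
    (((scanon p n).map (fun c => if c = '0' then '+' else c)).map
        (fun c => if c = '1' then '*' else c)).map (fun c => if c = '2' then '|' else c)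
      = mcanon p n := by
  induction p with
  | zero => intro n; simp [scanon, mcanon]
  | succ p ih =>
    intro n
    rw [scanon, mcanon]
    simp only [List.map_append, ih (n / 3)]
    congr 1
    have h3 : n % 3 = 0 ∨ n % 3 = 1 ∨ n % 3 = 2 := by omega
    rcases h3 with h|h|h <;> simp [h, dChar, opChar3]

lemma inner_eq (p n : Nat) (hp : 1 ≤ p) (h : n < 3 ^ p) :
    PySem.Str.replace (PySem.Str.replace (PySem.Str.replace
        (PySem.Str.zfill (to_custom_base_012 (n : Int)) (p : Int)) "0" "+") "1" "*") "2" "|"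
      = String.ofList (mcanon p n) := by
  conv_lhs => rw [PySem.Str.replace]
  rw [PySem.Str.toList_replace, PySem.Str.toList_replace, PySem.Str.toList_zfill]
  rw [zfill_custom p n hp h]
  rw [show ("0" : String).toList = ['0'] from rfl, show ("+" : String).toList = ['+'] from rfl,
    show ("1" : String).toList = ['1'] from rfl, show ("*" : String).toList = ['*'] from rfl,
    show ("2" : String).toList = ['2'] from rfl, show ("|" : String).toList = ['|'] from rfl]
  rw [replace_single, replace_single, replace_single, replace3_scanon]


lemma range_three_mul (m : Nat) :
    List.range (3 * m) = (List.range m).flatMap (fun q => [3 * q, 3 * q + 1, 3 * q + 2]) := by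
  induction m with
  | zero => simp
  | succ m ih =>
    have : 3 * (m + 1) = (3 * m + 1 + 1) + 1 := by ring
    rw [this, List.range_succ, List.range_succ, List.range_succ, ih, List.range_succ]
    simp

lemma step_C (p : Nat) : stepF (Cp p) = Cp (p + 1) := by
  unfold stepF Cp
  rw [show (3 : Nat) ^ (p + 1) = 3 * 3 ^ p from by ring, range_three_mul]
  rw [List.flatMap_map, List.map_flatMap]
  apply List.flatMap_congr  -- maybe name differs
  intro q hq
  have e0 : (3 * q) / 3 = q := by omega
  have e1 : (3 * q + 1) / 3 = q := by omega
  have e2 : (3 * q + 2) / 3 = q := by omega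
  have m0 : (3 * q) % 3 = 0 := by omega
  have m1 : (3 * q + 1) % 3 = 1 := by omega
  have m2 : (3 * q + 2) % 3 = 2 := by omega
  simp [mcanon, e0, e1, e2, m0, m1, m2, opChar3, String.toList_ofList]

lemma bStep_fst (st : List String × List (Int × List String)) (power : Int) :
    bStep st power = (stepF st.1, st.2 ++ [(power, (stepF st.1).filter (fun s => PySem.Str.isIn "|" s))]) := rfl

lemma fold_main (k : Nat) :
    (PySem.List.pyRange 1 ((k : Int) + 1) 1).foldl bStep ([""], [])
      = (Cp k, (PySem.List.pyRange 1 ((k : Int) + 1) 1).map (fun power =>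
          (power, (Cp power.toNat).filter (fun s => PySem.Str.isIn "|" s)))) := by
  induction k with
  | zero =>
    rw [PySem.List.pyRange_one_eq_nil (by norm_num)]
    simp [Cp, mcanon]
  | succ k ih =>
    have hcast : (((k + 1 : Nat) : Int) + 1) = ((k : Int) + 1) + 1 := by push_cast; ring
    rw [hcast, PySem.List.pyRange_one_succ_right (by omega), List.foldl_append, List.map_append, ih]
    simp only [List.foldl_cons, List.foldl_nil, bStep_fst, step_C]
    have ht : ((k : Int) + 1).toNat = k + 1 := by omega
    simp [ht]


lemma inner_list_eq (p : Nat) (hp : 1 ≤ p) :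
    (PySem.List.pyRange 0 ((3 : Int) ^ ((p : Int)).toNat) 1).map (fun n =>
        PySem.Str.replace (PySem.Str.replace (PySem.Str.replace
          (PySem.Str.zfill (to_custom_base_012 n) ((p : Int))) "0" "+") "1" "*") "2" "|")
      = Cp ((p : Int)).toNat := by
  simp only [Int.toNat_natCast]
  have h3 : (3 : Int) ^ p = ((3 ^ p : Nat) : Int) := by push_cast; ring
  rw [h3, PySem.List.pyRange_zero_natCast, List.map_map]
  unfold Cp
  apply List.map_congr_left
  intro n hn
  simp only [Function.comp]
  exact inner_eq p n hp (List.mem_range.1 hn)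

lemma A_eq (m : Int) :
    get_combinations_2 m = (PySem.List.pyRange 1 (m + 1) 1).map (fun power =>
      (power, (Cp power.toNat).filter (fun s => PySem.Str.isIn "|" s))) := by
  unfold get_combinations_2
  simp only [List.map_map]
  apply List.map_congr_left
  intro power hpow
  have hpos : 1 ≤ power := (PySem.List.mem_pyRange_one.1 hpow).1
  have hpc : power = ((power.toNat : Nat) : Int) := by omega
  simp only [Function.comp]
  rw [hpc, inner_list_eq power.toNat (by omega)]

-- ===== VERDICT (by name: the statement is the Claim_ definition above) =====
theorem get_combinations_2_spec : Claim_equal_get_combinations_2 := by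
  intro m _
  show get_combinations_2 m = get_combinations_2_alt m
  rw [A_eq]
  unfold get_combinations_2_alt
  by_cases hm : 0 ≤ m
  · have hmk : m = ((m.toNat : Nat) : Int) := by omega
    rw [hmk, fold_main]
  · rw [PySem.List.pyRange_one_eq_nil (by omega)]
    simp
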